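-- pv_equiv track=rewrite | github.com/dprgarner/codejam | 2017/round_2/chocolate.py | solve_case
-- ===== SOURCE A (Python) =====
-- import math
--
-- def solve_case(p, gs):
--     remainders = {i: 0 for i in range(p)}
--     count = 0
--     for g in gs:
--         remainders[g % p] += 1
--
--     count += remainders[0]
--
--     if p == 2:
--         return count + math.ceil(remainders[1] / 2)
--
--     if p == 3:
--         # Match 1 and 2 up with each other first
--         count += min(remainders[1], remainders[2])
--         remaining = abs(remainders[1] - remainders[2])
--         return count + math.ceil(remaining / 3)
--
--     if p == 4:
--         equiv_gs = []
--         for _ in range(min(remainders[1], remainders[3])):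
--             equiv_gs.append(1)
--             equiv_gs.append(3)
--
--         for _ in range(remainders[2]):
--             equiv_gs.append(2)
--
--         for _ in range(abs(remainders[1] - remainders[3])):
--             equiv_gs.append(1)  # Doesn't matter if 1s or 3s here
--
--         tally = 0
--         for x in equiv_gs:
--             if tally == 0:
--                 count += 1
--             tally = (tally + x) % 4
--
--         return count
-- ===== SOURCE B (Python) =====
-- def solve_case(p, gs):
--     # Count remainders directly; for p == 4 replace A's pair-list building and
--     # tally simulation with a closed-form arithmetic count.
--     def cnt(k):
--         return sum(1 for g in gs if g % p == k)
--
--     count = cnt(0)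
--
--     if p == 2:
--         return count + (cnt(1) + 1) // 2
--
--     if p == 3:
--         a, b = cnt(1), cnt(2)
--         return count + min(a, b) + (abs(a - b) + 2) // 3
--
--     if p == 4:
--         r1, r2, r3 = cnt(1), cnt(2), cnt(3)
--         pairs = min(r1, r3)
--         c = abs(r1 - r3)
--         ones = (c + 3) // 4 if r2 % 2 == 0 else (c + 1) // 4
--         return count + pairs + (r2 + 1) // 2 + ones
-- ===== Notes on version B (the rewrite author's own statement) =====
-- stated objective: alternative
-- what changed: B drops A's remainder dict in favour of direct per-remainder counts and, for p == 4, replaces A's materialised 1/3-pair+2s+1s list and running-tally simulation with a closed-form arithmetic count (pairs + ceil halves of twos + a parity-corrected quarter count of leftover ones); it trades A's single counting pass for a few countP passes but needs no dict and no O(n) scratch list.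
-- outside the precondition, e.g. on solve_case(5, [1]): A returns None, B returns None; on solve_case(1, [3]): A returns None, B returns None
import Mathlib
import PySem

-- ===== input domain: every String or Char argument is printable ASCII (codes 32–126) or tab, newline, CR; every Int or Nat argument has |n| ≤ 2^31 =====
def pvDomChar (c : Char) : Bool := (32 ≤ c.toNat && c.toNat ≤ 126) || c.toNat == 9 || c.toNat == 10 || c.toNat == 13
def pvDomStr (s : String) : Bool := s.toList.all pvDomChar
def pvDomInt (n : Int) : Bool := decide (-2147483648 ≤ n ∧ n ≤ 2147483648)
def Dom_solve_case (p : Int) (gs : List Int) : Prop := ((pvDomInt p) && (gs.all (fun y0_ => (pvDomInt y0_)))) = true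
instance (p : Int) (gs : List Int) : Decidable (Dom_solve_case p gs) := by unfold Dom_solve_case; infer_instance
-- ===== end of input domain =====

-- B replaces A's remainder dict, pair-list materialisation and tally simulation (p = 4)
-- with direct remainder counts and a closed-form arithmetic count; equivalence is on the
-- return value for p ∈ {2, 3, 4}, the only moduli on which A returns an int.

-- ===== PORT A =====
-- the body of A's tally loop (for x in equiv_gs: if tally == 0: count += 1; tally = (tally + x) % 4)
def pvStep (ct : Int × Int) (x : Int) : Int × Int :=
  (if ct.2 = 0 then ct.1 + 1 else ct.1, PySem.Int.mod (ct.2 + x) 4)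

def solve_case (p : Int) (gs : List Int) : Int :=
  -- remainders = {i: 0 for i in range(p)}
  let remainders0 : PySem.Dict Int Int :=
    (PySem.List.pyRange 0 p 1).foldl (fun d i => d.insert i 0) PySem.Dict.empty
  -- for g in gs: remainders[g % p] += 1  (the key exists for every p admitted by Pre_; the
  -- KeyError/ZeroDivisionError cases p ≤ 0 are outside Pre_)
  let remainders := gs.foldl (fun d g => d.modify (PySem.Int.mod g p) 0 (· + 1)) remainders0
  let count := 0 + remainders.getD 0 0
  if p = 2 then
    -- math.ceil(r / 2) on a nonnegative int r is exactly -((-r) // 2)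
    count + -(PySem.Int.floordiv (-(remainders.getD 1 0)) 2)
  else if p = 3 then
    let count := count + min (remainders.getD 1 0) (remainders.getD 2 0)
    let remaining := |remainders.getD 1 0 - remainders.getD 2 0|
    count + -(PySem.Int.floordiv (-remaining) 3)
  else if p = 4 then
    let equiv_gs : List Int :=
      (PySem.List.pyRange 0 (min (remainders.getD 1 0) (remainders.getD 3 0)) 1).foldl
        (fun l _ => l ++ [1, 3]) []
    let equiv_gs :=
      (PySem.List.pyRange 0 (remainders.getD 2 0) 1).foldl (fun l _ => l ++ [2]) equiv_gs
    let equiv_gs :=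
      (PySem.List.pyRange 0 (|remainders.getD 1 0 - remainders.getD 3 0|) 1).foldl
        (fun l _ => l ++ [1]) equiv_gs
    let r := equiv_gs.foldl pvStep (count, 0)
    r.1
  else 0  -- Python falls off the end and returns None here; outside Pre_

-- ===== PORT B =====
-- cnt(k) = sum(1 for g in gs if g % p == k)
def pvCnt (p : Int) (gs : List Int) (k : Int) : Int :=
  ((gs.countP (fun g => PySem.Int.mod g p == k) : Nat) : Int)

def solve_case_alt (p : Int) (gs : List Int) : Int :=
  let count := pvCnt p gs 0
  if p = 2 then
    count + PySem.Int.floordiv (pvCnt p gs 1 + 1) 2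
  else if p = 3 then
    let a := pvCnt p gs 1
    let b := pvCnt p gs 2
    count + min a b + PySem.Int.floordiv (|a - b| + 2) 3
  else if p = 4 then
    let r1 := pvCnt p gs 1
    let r2 := pvCnt p gs 2
    let r3 := pvCnt p gs 3
    let pairs := min r1 r3
    let c := |r1 - r3|
    let ones := if PySem.Int.mod r2 2 = 0 then PySem.Int.floordiv (c + 3) 4
                else PySem.Int.floordiv (c + 1) 4
    count + pairs + PySem.Int.floordiv (r2 + 1) 2 + ones
  else 0  -- Python falls off the end and returns None here; outside Pre_

-- ===== PRECONDITION & SPEC =====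
-- Pre_ excludes the moduli on which A does not return an int: A raises (KeyError /
-- ZeroDivisionError) for p ≤ 0 with nonempty gs, and returns None (not an int) for
-- p = 1, p ≥ 5 and for p ≤ 0 with gs = [].
def Pre_solve_case (p : Int) (gs : List Int) : Prop := p = 2 ∨ p = 3 ∨ p = 4
instance (p : Int) (gs : List Int) : Decidable (Pre_solve_case p gs) := by
  unfold Pre_solve_case; infer_instance
def pvWitness_solve_case : Int × List Int := (4, [3, 5, 8, 1, 2, 6])

def Spec_solve_case (p : Int) (gs : List Int) (out : Int) : Prop := out = solve_case_alt p gs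
instance (p : Int) (gs : List Int) (out : Int) : Decidable (Spec_solve_case p gs out) := by
  unfold Spec_solve_case; infer_instance

-- ===== CLAIM (what is proved, stated in full; the proofs are below) =====
def Claim_equal_solve_case : Prop := ∀ (p : Int) (gs : List Int),
  Dom_solve_case p gs → Pre_solve_case p gs → Spec_solve_case p gs (solve_case p gs)

-- ===== LEMMAS AND PROOFS =====

-- the range-initialised dict maps every key to 0
lemma pvGetD_init (l : List Int) (k : Int) : ∀ d : PySem.Dict Int Int, d.getD k 0 = 0 →
    (l.foldl (fun d i => d.insert i 0) d).getD k 0 = 0 := by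
  induction l with
  | nil => intro d hd; simpa using hd
  | cons i l ih =>
    intro d hd
    simp only [List.foldl_cons]
    exact ih _ (by rw [PySem.Dict.getD_insert]; split <;> simp [hd])

-- A's dict after the counting loop agrees with B's direct count at every key
lemma pvDict_count (p : Int) (gs : List Int) (k : Int) :
    (gs.foldl (fun d g => d.modify (PySem.Int.mod g p) 0 (· + 1))
      ((PySem.List.pyRange 0 p 1).foldl (fun d i => d.insert i 0) PySem.Dict.empty)).getD k 0
      = pvCnt p gs k := by
  rw [← List.foldl_map (f := fun g => PySem.Int.mod g p)
      (g := fun d x => PySem.Dict.modify d x 0 (· + 1))]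
  rw [PySem.Dict.getD_foldl_modify_add_one]
  rw [pvGetD_init _ _ _ (by simp [PySem.Dict.getD_empty])]
  simp only [zero_add, pvCnt, List.count, List.countP_map]
  rfl

-- the tally loop over a (1,3)-pairs counts one group per pair and returns to tally 0
lemma pvPairs_fold (n : Nat) : ∀ c : Int,
    ((List.replicate n ([1, 3] : List Int)).flatten).foldl pvStep (c, 0) = (c + n, 0) := by
  induction n with
  | zero => intro c; simp
  | succ n ih =>
    intro c
    have h1 : pvStep (c, 0) 1 = (c + 1, 1) := by
      simp only [pvStep]; norm_num
    have h2 : pvStep (c + 1, 1) 3 = (c + 1, 0) := by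
      simp only [pvStep]; norm_num
    simp only [List.replicate_succ, List.flatten_cons, List.cons_append, List.nil_append,
      List.foldl_cons, h1, h2, ih]
    simp only [Prod.mk.injEq]
    refine ⟨by push_cast; ring, trivial⟩

-- the tally loop over b twos, from tally 0 and from tally 2
lemma pvTwos_fold (n : Nat) : ∀ c : Int,
    (List.replicate n (2 : Int)).foldl pvStep (c, 0)
      = (c + (((n + 1) / 2 : Nat) : Int), if n % 2 = 0 then (0 : Int) else 2)
    ∧ (List.replicate n (2 : Int)).foldl pvStep (c, 2)
      = (c + ((n / 2 : Nat) : Int), if n % 2 = 0 then (2 : Int) else 0) := by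
  induction n with
  | zero => intro c; simp
  | succ n ih =>
    intro c
    have h0 : pvStep (c, 0) 2 = (c + 1, 2) := by
      simp only [pvStep]; norm_num
    have h2 : pvStep (c, 2) 2 = (c, 0) := by
      simp only [pvStep]; norm_num
    constructor
    · simp only [List.replicate_succ, List.foldl_cons, h0, (ih (c + 1)).2, Prod.mk.injEq]
      refine ⟨by push_cast; omega, ?_⟩
      have h1 : (n + 1) % 2 = 0 ↔ ¬ n % 2 = 0 := by omega
      by_cases hn : n % 2 = 0 <;> simp [hn, h1]
    · simp only [List.replicate_succ, List.foldl_cons, h2, (ih c).1, Prod.mk.injEq]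
      refine ⟨trivial, ?_⟩
      have h1 : (n + 1) % 2 = 0 ↔ ¬ n % 2 = 0 := by omega
      by_cases hn : n % 2 = 0 <;> simp [hn, h1]

-- the tally loop over n ones from tally t < 4: groups counted in closed form
lemma pvOnes_fold (n : Nat) : ∀ t : Nat, t < 4 → ∀ c : Int,
    ((List.replicate n (1 : Int)).foldl pvStep (c, (t : Int))).1
      = c + (((n - (4 - t) % 4 + 3) / 4 : Nat) : Int) := by
  induction n with
  | zero =>
    intro t ht c
    simp only [List.replicate_zero, List.foldl_nil]
    have h : ((0 - (4 - t) % 4 + 3) / 4 : Nat) = 0 := by omega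
    rw [h]
    simp
  | succ n ih =>
    intro t ht c
    have hstep : pvStep (c, (t : Int)) 1
        = (if t = 0 then c + 1 else c, (((t + 1) % 4 : Nat) : Int)) := by
      have hm : PySem.Int.mod ((t : Int) + 1) 4 = (((t + 1) % 4 : Nat) : Int) := by
        rw [show ((t : Int) + 1) = (((t + 1 : Nat)) : Int) by omega]
        exact_mod_cast PySem.Int.mod_natCast (t + 1) 4
      simp only [pvStep, Nat.cast_eq_zero, hm]
    simp only [List.replicate_succ, List.foldl_cons, hstep]
    rw [ih ((t + 1) % 4) (Nat.mod_lt _ (by omega))]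
    by_cases h0 : t = 0
    · subst h0
      have harith : (n - (4 - (0 + 1) % 4) % 4 + 3) / 4 + 1 = (n + 1 - (4 - 0) % 4 + 3) / 4 := by
        omega
      rw [← harith, Nat.cast_add, Nat.cast_one, if_pos rfl]
      omega
    · simp only [if_neg h0]
      have h1 : 1 ≤ t := by omega
      have harith : (n - (4 - (t + 1) % 4) % 4 + 3) / 4 = (n + 1 - (4 - t) % 4 + 3) / 4 := by
        interval_cases t <;> omega
      rw [harith]

-- A's whole p = 4 simulation, in terms of the pair / two / one multiplicities
lemma pvP4_sim (a b c : Nat) (c0 : Int) :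
    (((((List.replicate a ([1, 3] : List Int)).flatten) ++ List.replicate b (2 : Int))
        ++ List.replicate c (1 : Int)).foldl pvStep (c0, 0)).1
      = c0 + a + (((b + 1) / 2 : Nat) : Int)
        + ((if b % 2 = 0 then (c + 3) / 4 else (c + 1) / 4 : Nat) : Int) := by
  rw [List.foldl_append, List.foldl_append, pvPairs_fold, (pvTwos_fold b (c0 + a)).1]
  by_cases hb : b % 2 = 0
  · simp only [if_pos hb]
    have h := pvOnes_fold c 0 (by omega) (c0 + a + (((b + 1) / 2 : Nat) : Int))
    simp only [Nat.cast_zero] at h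
    rw [h]
    have harith : (c - (4 - 0) % 4 + 3) / 4 = (c + 3) / 4 := by omega
    rw [harith]
  · simp only [if_neg hb]
    have h := pvOnes_fold c 2 (by omega) (c0 + a + (((b + 1) / 2 : Nat) : Int))
    rw [show ((2 : Nat) : Int) = (2 : Int) by norm_num] at h
    rw [h]
    have harith : (c - (4 - 2) % 4 + 3) / 4 = (c + 1) / 4 := by omega
    rw [harith]

-- ===== VERDICT (by name: the statement is the Claim_ definition above) =====
theorem solve_case_spec : Claim_equal_solve_case := by
  intro p gs _ hpre
  unfold Spec_solve_case
  rcases hpre with h | h | h <;> subst h <;>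
    simp only [solve_case, solve_case_alt, pvDict_count, zero_add, reduceIte] <;>
    norm_num
  · -- p = 2
    omega
  · -- p = 3
    generalize |pvCnt 3 gs 1 - pvCnt 3 gs 2| = y
    omega
  · -- p = 4
    rw [← List.foldl_append, ← List.foldl_append]
    simp only [pvCnt]
    generalize gs.countP (fun g => PySem.Int.mod g 4 == 0) = n0
    generalize gs.countP (fun g => PySem.Int.mod g 4 == 1) = n1
    generalize gs.countP (fun g => PySem.Int.mod g 4 == 2) = n2
    generalize gs.countP (fun g => PySem.Int.mod g 4 == 3) = n3
    rw [← Nat.cast_min, ← Int.natCast_natAbs]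
    simp only [Int.toNat_natCast]
    rw [← List.append_assoc, pvP4_sim]
    have hd : ((2 : Int) ∣ (n2 : Int)) ↔ n2 % 2 = 0 := by omega
    by_cases h2 : n2 % 2 = 0
    · rw [if_pos h2, if_pos (hd.mpr h2)]
      omega
    · rw [if_neg h2, if_neg (fun h => h2 (hd.mp h))]
      omega
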